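-- pv_equiv track=rewrite | github.com/AbdulAhad629/CAFE-CHATBOT | app/services/chatbot_service.py | _find_menu_item
-- ===== SOURCE A (Python) =====
-- from typing import Dict, List, Optional
--
-- def _find_menu_item(item_str: str, menu_items: Dict) -> Optional[Dict]:
--     """Find menu item from user input"""
--
--     if item_str in menu_items:
--         return menu_items[item_str]
--
--     for key, item in menu_items.items():
--         if key in item_str or item_str in key:
--             return item
--
--     for key, item in menu_items.items():
--         for keyword in ['burger', 'coffee', 'pizza', 'fries', 'tea']:
--             if keyword in item_str and keyword in key:
--                 return item
--
--     return None
-- ===== SOURCE B (Python) =====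
-- def _find_menu_item(item_str: str, menu_items):
--     """Find menu item from user input: single pass with a keyword fallback slot."""
--     if item_str in menu_items:
--         return menu_items[item_str]
--
--     keywords = ('burger', 'coffee', 'pizza', 'fries', 'tea')
--     fallback = None
--     for key, item in menu_items.items():
--         if key in item_str or item_str in key:
--             return item
--         if fallback is None and any(kw in item_str and kw in key for kw in keywords):
--             fallback = item
--     return fallback
-- ===== Notes on version B (the rewrite author's own statement) =====
-- stated objective: alternative
-- what changed: Replaced A's two sequential scans (substring pass, then keyword pass) by a single pass that returns on a substring hit and records the first keyword hit in a fallback slot returned after the loop.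
import Mathlib
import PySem

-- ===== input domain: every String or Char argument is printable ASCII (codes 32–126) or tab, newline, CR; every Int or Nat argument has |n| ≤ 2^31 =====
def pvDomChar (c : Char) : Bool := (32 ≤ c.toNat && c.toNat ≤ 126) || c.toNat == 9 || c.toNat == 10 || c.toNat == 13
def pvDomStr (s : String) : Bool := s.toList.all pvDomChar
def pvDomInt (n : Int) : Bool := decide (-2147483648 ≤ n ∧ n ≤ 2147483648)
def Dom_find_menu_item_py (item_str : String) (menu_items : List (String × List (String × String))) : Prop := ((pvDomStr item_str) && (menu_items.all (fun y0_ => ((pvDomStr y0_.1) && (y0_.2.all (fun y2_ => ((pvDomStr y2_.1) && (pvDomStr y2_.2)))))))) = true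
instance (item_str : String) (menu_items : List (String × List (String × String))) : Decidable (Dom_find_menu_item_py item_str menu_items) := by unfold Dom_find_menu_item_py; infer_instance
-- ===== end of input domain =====

-- B merges A's two sequential scans into ONE pass with a keyword-fallback slot; alternative decomposition, same cost.

-- ===== PORT A =====
def pvKeywords : List String := ["burger", "coffee", "pizza", "fries", "tea"]

-- `item_str in menu_items` / `menu_items[item_str]` : first matching key (dict as assoc list)
def pvAGet (item_str : String) : List (String × List (String × String)) → Option (List (String × String))
  | [] => none
  | (k, v) :: rest => if k == item_str then some v else pvAGet item_str rest

-- first for-loop of A: substring match either way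
def pvAPass1 (item_str : String) : List (String × List (String × String)) → Option (List (String × String))
  | [] => none
  | (key, item) :: rest =>
      if PySem.Str.isIn key item_str || PySem.Str.isIn item_str key then some item
      else pvAPass1 item_str rest

-- second for-loop of A: keyword in both item_str and key
def pvAPass2 (item_str : String) : List (String × List (String × String)) → Option (List (String × String))
  | [] => none
  | (key, item) :: rest =>
      if pvKeywords.any (fun kw => PySem.Str.isIn kw item_str && PySem.Str.isIn kw key) then some item
      else pvAPass2 item_str rest

def find_menu_item_py (item_str : String) (menu_items : List (String × List (String × String))) : Option (List (String × String)) :=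
  match pvAGet item_str menu_items with
  | some v => some v
  | none =>
      match pvAPass1 item_str menu_items with
      | some v => some v
      | none => pvAPass2 item_str menu_items

-- ===== PORT B =====
-- single pass: return on substring hit, record first keyword hit in fallback slot
def pvBLoop (item_str : String) : List (String × List (String × String)) → Option (List (String × String)) → Option (List (String × String))
  | [], fallback => fallback
  | (key, item) :: rest, fallback =>
      if PySem.Str.isIn key item_str || PySem.Str.isIn item_str key then some item
      else
        pvBLoop item_str rest
          (if fallback.isNone && pvKeywords.any (fun kw => PySem.Str.isIn kw item_str && PySem.Str.isIn kw key)
           then some item else fallback)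

def find_menu_item_py_alt (item_str : String) (menu_items : List (String × List (String × String))) : Option (List (String × String)) :=
  match (PySem.Dict.mk menu_items).get? item_str with
  | some v => some v
  | none => pvBLoop item_str menu_items none

-- ===== PRECONDITION & SPEC =====
def Spec_find_menu_item_py (item_str : String) (menu_items : List (String × List (String × String))) (out : Option (List (String × String))) : Prop := out = find_menu_item_py_alt item_str menu_items
instance (item_str : String) (menu_items : List (String × List (String × String))) (out : Option (List (String × String))) : Decidable (Spec_find_menu_item_py item_str menu_items out) := by unfold Spec_find_menu_item_py; infer_instance

-- ===== CLAIM (what is proved, stated in full; the proofs are below) =====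
def Claim_equal_find_menu_item_py : Prop := ∀ (item_str : String) (menu_items : List (String × List (String × String))), Dom_find_menu_item_py item_str menu_items → Spec_find_menu_item_py item_str menu_items (find_menu_item_py item_str menu_items)

-- ===== LEMMAS AND PROOFS =====

theorem pvAGet_eq_dictGet (item_str : String) (l : List (String × List (String × String))) :
    pvAGet item_str l = (PySem.Dict.mk l).get? item_str := by
  induction l with
  | nil => rfl
  | cons p rest ih =>
      obtain ⟨k, v⟩ := p
      simp [pvAGet, PySem.Dict.get?_mk_cons, ih]

theorem pvBLoop_eq (item_str : String) (l : List (String × List (String × String)))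
    (fb : Option (List (String × String))) :
    pvBLoop item_str l fb =
      match pvAPass1 item_str l with
      | some v => some v
      | none => fb.or (pvAPass2 item_str l) := by
  induction l generalizing fb with
  | nil => cases fb <;> rfl
  | cons p rest ih =>
      obtain ⟨key, item⟩ := p
      cases hsub : (PySem.Str.isIn key item_str || PySem.Str.isIn item_str key) with
      | true => simp only [pvBLoop, pvAPass1, hsub, if_true]
      | false =>
        cases hkw : (pvKeywords.any (fun kw => PySem.Str.isIn kw item_str && PySem.Str.isIn kw key)) with
        | true =>
            cases fb <;>
              simp only [pvBLoop, pvAPass1, pvAPass2, hsub, hkw, ih, Option.isNone,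
                Bool.true_and, Bool.false_and, if_true, if_false, Bool.false_eq_true] <;>
              cases pvAPass1 item_str rest <;> simp [Option.or]
        | false =>
            simp only [pvBLoop, pvAPass1, pvAPass2, hsub, hkw, ih, Bool.and_false,
              if_false, Bool.false_eq_true]

-- ===== VERDICT (by name: the statement is the Claim_ definition above) =====
theorem find_menu_item_py_spec : Claim_equal_find_menu_item_py := by
  intro item_str menu_items _
  unfold Spec_find_menu_item_py find_menu_item_py find_menu_item_py_alt
  rw [← pvAGet_eq_dictGet, pvBLoop_eq]
  cases pvAGet item_str menu_items <;> simp
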